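-- pv_equiv track=rewrite | github.com/wndlthsk/algorithm-study | week10/조승빈/1713_조승빈.py | get_victim
-- ===== SOURCE A (Python) =====
-- def get_victim(memo, time_memo):
--     candidates = [
--         i for i in range(1, len(memo))
--         if memo[i] != 0 and time_memo[i] != 0
--     ]
--     min_memo_value = min(memo[i] for i in candidates)
--     min_index = min(
--         (i for i in candidates if memo[i] == min_memo_value),
--         key=lambda x: time_memo[x]
--     )
--     return min_index
-- ===== SOURCE B (Python) =====
-- def get_victim(memo, time_memo):
--     best = None
--     for i in range(1, len(memo)):
--         if memo[i] != 0 and time_memo[i] != 0: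
--             if best is None or (memo[i], time_memo[i]) < (memo[best], time_memo[best]):
--                 best = i
--     return best
-- ===== Notes on version B (the rewrite author's own statement) =====
-- stated objective: simpler
-- what changed: A builds a candidate list and runs two selection passes (min of memo values, then argmin of time among the ties); B makes a single pass keeping the index with the lexicographically smallest (memo, time) pair and builds no intermediate lists; Pre_ excludes inputs where A raises (IndexError when a nonzero memo index reaches past time_memo, and min()'s ValueError when no candidate exists, where B returns None instead of an int).
import Mathlib
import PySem

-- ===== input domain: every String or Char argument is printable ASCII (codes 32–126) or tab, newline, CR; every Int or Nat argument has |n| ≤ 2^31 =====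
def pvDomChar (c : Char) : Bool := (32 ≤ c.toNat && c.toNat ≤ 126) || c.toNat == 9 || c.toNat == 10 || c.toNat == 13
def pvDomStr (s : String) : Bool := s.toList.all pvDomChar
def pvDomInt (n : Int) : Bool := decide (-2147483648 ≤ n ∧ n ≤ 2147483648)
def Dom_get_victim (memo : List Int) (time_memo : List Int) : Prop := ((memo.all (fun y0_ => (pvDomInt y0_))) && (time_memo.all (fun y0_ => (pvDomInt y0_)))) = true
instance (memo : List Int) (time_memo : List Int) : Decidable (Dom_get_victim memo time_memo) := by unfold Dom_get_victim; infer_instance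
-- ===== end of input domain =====

-- B replaces A's three passes (candidate comprehension, min of memo values, argmin of time among ties)
-- by one pass keeping the index with the lexicographically smallest (memo, time) pair (simpler, single scan).

-- ===== PORT A =====
def get_victim (memo : List Int) (time_memo : List Int) : Int :=
  let candidates := (PySem.List.pyRange 1 memo.length 1).filter
    (fun i => PySem.List.pyGetD memo i 0 != 0 && PySem.List.pyGetD time_memo i 0 != 0)
  let min_memo_value :=
    (PySem.List.min? (candidates.map (fun i => PySem.List.pyGetD memo i 0)) (fun v => v)).getD 0
  let min_index :=
    (PySem.List.min? (candidates.filter (fun i => PySem.List.pyGetD memo i 0 == min_memo_value))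
      (fun x => PySem.List.pyGetD time_memo x 0)).getD 0
  min_index

-- ===== PORT B =====
def get_victim_alt (memo : List Int) (time_memo : List Int) : Int :=
  let best := (PySem.List.pyRange 1 memo.length 1).foldl
    (fun best i =>
      if PySem.List.pyGetD memo i 0 != 0 && PySem.List.pyGetD time_memo i 0 != 0 then
        match best with
        | none => some i
        | some b =>
          if decide (PySem.List.pyGetD memo i 0 < PySem.List.pyGetD memo b 0) ||
             (PySem.List.pyGetD memo i 0 == PySem.List.pyGetD memo b 0 &&
              decide (PySem.List.pyGetD time_memo i 0 < PySem.List.pyGetD time_memo b 0)) then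
            some i
          else best
      else best)
    (none : Option Int)
  match best with
  | some i => i
  | none => 0   -- unreachable under Pre_: the Python B returns None here (no candidates)

-- ===== PRECONDITION & SPEC =====
-- Pre_ excludes exactly the inputs on which A raises: an IndexError when some index i in
-- range(1, len(memo)) with memo[i] != 0 reaches past time_memo, and the ValueError of min() on an
-- empty candidate list (where B returns None, not an int).
def Pre_get_victim (memo : List Int) (time_memo : List Int) : Prop :=
  (∀ i ∈ PySem.List.pyRange 1 memo.length 1,
      PySem.List.pyGetD memo i 0 ≠ 0 → i < (time_memo.length : Int)) ∧
  (∃ i ∈ PySem.List.pyRange 1 memo.length 1,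
      PySem.List.pyGetD memo i 0 ≠ 0 ∧ PySem.List.pyGetD time_memo i 0 ≠ 0)
instance (memo : List Int) (time_memo : List Int) : Decidable (Pre_get_victim memo time_memo) := by
  unfold Pre_get_victim; infer_instance

def pvWitness_get_victim : List Int × List Int := ([5, 3, 2, 2], [1, 4, 7, 2])

def Spec_get_victim (memo : List Int) (time_memo : List Int) (out : Int) : Prop := out = get_victim_alt memo time_memo
instance (memo : List Int) (time_memo : List Int) (out : Int) : Decidable (Spec_get_victim memo time_memo out) := by unfold Spec_get_victim; infer_instance

-- ===== CLAIM (what is proved, stated in full; the proofs are below) =====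
def Claim_equal_get_victim : Prop := ∀ (memo : List Int) (time_memo : List Int), Dom_get_victim memo time_memo → Pre_get_victim memo time_memo → Spec_get_victim memo time_memo (get_victim memo time_memo)

-- ===== LEMMAS AND PROOFS =====

-- the one-pass lexicographic step on index accumulators
def lexStep (km kt : Int → Int) (acc : Option Int) (i : Int) : Option Int :=
  match acc with
  | none => some i
  | some j => if km i < km j ∨ (km i = km j ∧ kt i < kt j) then some i else some j

-- A's selection core: argmin by kt among the indices whose km-value is minimal
def aCore (km kt : Int → Int) (c : List Int) : Option Int :=
  PySem.List.min? (c.filter (fun i => km i == (PySem.List.min? (c.map km) (fun v => v)).getD 0)) kt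

theorem min?_snoc {α κ : Type} [LT κ] [DecidableLT κ] (xs : List α) (x : α) (key : α → κ) :
    PySem.List.min? (xs ++ [x]) key =
      (match PySem.List.min? xs key with
       | none => some x
       | some m => if key x < key m then some x else some m) := by
  unfold PySem.List.min?
  rw [List.foldl_append, List.foldl_cons, List.foldl_nil]
  rfl

theorem lexFold_none (km kt : Int → Int) (c : List Int)
    (h : c.foldl (lexStep km kt) none = none) : c = [] := by
  induction c using List.reverseRecOn with
  | nil => rfl
  | append_singleton c x ih =>
    rw [List.foldl_append, List.foldl_cons, List.foldl_nil] at h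
    cases hc : c.foldl (lexStep km kt) none <;> rw [hc] at h <;>
      simp only [lexStep] at h
    · exact absurd h (by simp)
    · split at h <;> simp at h

theorem lexFold_inv (km kt : Int → Int) (c : List Int) (e : Int)
    (h : c.foldl (lexStep km kt) none = some e) :
    e ∈ c ∧ ∀ j ∈ c, km e < km j ∨ (km e = km j ∧ kt e ≤ kt j) := by
  induction c using List.reverseRecOn generalizing e with
  | nil => simp at h
  | append_singleton c x ih =>
    rw [List.foldl_append, List.foldl_cons, List.foldl_nil] at h
    cases hc : c.foldl (lexStep km kt) none with
    | none =>
      have hcnil := lexFold_none km kt c hc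
      subst hcnil
      rw [List.foldl_nil] at h
      simp only [lexStep] at h
      cases h
      refine ⟨by simp, ?_⟩
      intro j hj; simp at hj; subst hj; right; exact ⟨rfl, le_refl _⟩
    | some b =>
      rw [hc] at h
      obtain ⟨hbmem, hbmin⟩ := ih b hc
      simp only [lexStep] at h
      split at h
      · rename_i hlt
        cases h
        refine ⟨by simp, ?_⟩
        intro j hj
        simp at hj
        rcases hj with hj | hj
        · have := hbmin j hj
          rcases hlt with hlt | ⟨heq, hlt2⟩
          · rcases this with h1 | ⟨h2, h3⟩
            · left; omega
            · left; omega
          · rcases this with h1 | ⟨h2, h3⟩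
            · left; omega
            · right; exact ⟨by omega, by omega⟩
        · subst hj; right; exact ⟨rfl, le_refl _⟩
      · rename_i hnlt
        cases h
        refine ⟨by simp [hbmem], ?_⟩
        intro j hj
        simp at hj
        rcases hj with hj | hj
        · exact hbmin j hj
        · subst hj
          push Not at hnlt
          rcases lt_trichotomy (km e) (km j) with h1 | h1 | h1
          · left; exact h1
          · right; exact ⟨h1, by have := hnlt.2 h1.symm; omega⟩
          · exact absurd h1 (by have := hnlt.1; omega)

theorem aCore_eq_lexFold (km kt : Int → Int) (c : List Int) :
    aCore km kt c = c.foldl (lexStep km kt) none := by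
  induction c using List.reverseRecOn with
  | nil => simp [aCore, PySem.List.min?]
  | append_singleton c x ih =>
    rw [List.foldl_append, List.foldl_cons, List.foldl_nil]
    cases hc : c.foldl (lexStep km kt) none with
    | none =>
      have hcnil := lexFold_none km kt c hc
      subst hcnil
      simp [aCore, lexStep, PySem.List.min?]
    | some e =>
      obtain ⟨hemem, hemin⟩ := lexFold_inv km kt c e hc
      rw [hc] at ih
      have hminc : PySem.List.min? (c.map km) (fun v => v) = some (km e) := by
        cases hm : PySem.List.min? (c.map km) (fun v => v) with
        | none =>
          rw [PySem.List.min?_eq_none_iff] at hm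
          rw [List.map_eq_nil_iff] at hm
          subst hm; simp at hemem
        | some m =>
          have hmmem := PySem.List.min?_mem hm
          have hmmin := PySem.List.min?_isMin hm
          simp only [List.mem_map] at hmmem
          obtain ⟨j0, hj0, hj0e⟩ := hmmem
          have h1 : m ≤ km e := hmmin (km e) (List.mem_map_of_mem hemem)
          have h2 : km e ≤ m := by
            have := hemin j0 hj0
            omega
          rw [le_antisymm h1 h2]
      unfold aCore
      rw [List.map_append, List.map_singleton, min?_snoc, hminc]
      by_cases hlt : km x < km e
      · simp only [if_pos hlt, Option.getD_some]
        have hfilter : (c ++ [x]).filter (fun i => km i == km x) = [x] := by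
          rw [List.filter_append]
          have hnil : c.filter (fun i => km i == km x) = [] := by
            rw [List.filter_eq_nil_iff]
            intro j hj
            have := hemin j hj
            simp only [beq_iff_eq]
            omega
          simp [hnil]
        rw [hfilter]
        have hstep : lexStep km kt (some e) x = some x := by
          simp only [lexStep]; rw [if_pos (Or.inl hlt)]
        rw [hstep]
        simp [PySem.List.min?]
      · simp only [if_neg hlt, Option.getD_some]
        have hacore : PySem.List.min? (c.filter (fun i => km i == km e)) kt = some e := by
          have h := ih; unfold aCore at h; rw [hminc] at h
          simpa using h
        rw [List.filter_append]
        by_cases hxe : km x = km e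
        · have hfx : [x].filter (fun i => km i == km e) = [x] := by simp [hxe]
          rw [hfx, min?_snoc, hacore]
          have hstep : lexStep km kt (some e) x =
              if kt x < kt e then some x else some e := by
            simp only [lexStep]
            by_cases hkt : kt x < kt e
            · rw [if_pos (Or.inr ⟨hxe, hkt⟩), if_pos hkt]
            · rw [if_neg (by rintro (h | ⟨_, h⟩); exact hlt h; exact hkt h), if_neg hkt]
          rw [hstep]
        · have hfx : [x].filter (fun i => km i == km e) = [] := by simp [hxe]
          rw [hfx, List.append_nil, hacore]
          simp only [lexStep]
          rw [if_neg (by rintro (h | ⟨h, _⟩); exact hlt h; exact hxe h)]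

-- B's guarded fold over the full range equals the plain lexicographic fold over the candidates
theorem bFold_rel (km kt : Int → Int) (l : List Int) (a : Option Int) :
    l.foldl
      (fun best i =>
        if km i != 0 && kt i != 0 then
          match best with
          | none => some i
          | some b =>
            if decide (km i < km b) || (km i == km b && decide (kt i < kt b)) then some i else best
        else best)
      a =
    (l.filter (fun i => km i != 0 && kt i != 0)).foldl (lexStep km kt) a := by
  induction l generalizing a with
  | nil => rfl
  | cons x l ih =>
    rw [List.foldl_cons, List.filter_cons]
    by_cases hp : (km x != 0 && kt x != 0) = true
    · rw [if_pos hp, hp, if_pos rfl, List.foldl_cons]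
      have hstep : (match a with
          | none => some x
          | some b =>
            if decide (km x < km b) || (km x == km b && decide (kt x < kt b)) then some x else a)
          = lexStep km kt a x := by
        cases a with
        | none => rfl
        | some b =>
          simp only [lexStep]
          by_cases hl : km x < km b ∨ (km x = km b ∧ kt x < kt b)
          · rw [if_pos hl]
            have : (decide (km x < km b) || (km x == km b && decide (kt x < kt b))) = true := by
              rcases hl with h | ⟨h1, h2⟩ <;> simp [*]
            rw [this, if_pos rfl]
          · push Not at hl
            have hnp : ¬ (km x < km b ∨ (km x = km b ∧ kt x < kt b)) := by
              rintro (h | ⟨h1, h2⟩)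
              · exact absurd h (not_lt.mpr hl.1)
              · exact absurd h2 (not_lt.mpr (hl.2 h1))
            have hb : (decide (km x < km b) || (km x == km b && decide (kt x < kt b))) = false := by
              by_cases h2 : km x = km b
              · simp [h2, not_lt.mpr (hl.2 h2)]
              · simp [not_lt.mpr hl.1, h2]
            rw [hb, if_neg hnp]
            simp
      rw [hstep]
      exact ih (lexStep km kt a x)
    · have hp' : (km x != 0 && kt x != 0) = false := by simpa using hp
      simp only [hp', Bool.false_eq_true, if_false]
      exact ih a

theorem getD_match_zero (m : Option Int) :
    (match m with | some i => i | none => 0) = m.getD 0 := by cases m <;> rfl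

theorem ports_eq (memo time_memo : List Int) :
    get_victim memo time_memo = get_victim_alt memo time_memo := by
  have h1 := bFold_rel (fun i => PySem.List.pyGetD memo i 0) (fun i => PySem.List.pyGetD time_memo i 0)
    (PySem.List.pyRange 1 memo.length 1) none
  have h2 := aCore_eq_lexFold (fun i => PySem.List.pyGetD memo i 0) (fun i => PySem.List.pyGetD time_memo i 0)
    ((PySem.List.pyRange 1 memo.length 1).filter
      (fun i => PySem.List.pyGetD memo i 0 != 0 && PySem.List.pyGetD time_memo i 0 != 0))
  unfold get_victim get_victim_alt
  rw [h1, ← h2, getD_match_zero]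
  rfl

-- ===== VERDICT (by name: the statement is the Claim_ definition above) =====
theorem get_victim_spec : Claim_equal_get_victim := by
  intro memo time_memo _ _
  unfold Spec_get_victim
  exact ports_eq memo time_memo
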